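-- pv_equiv track=rewrite | github.com/LitostSwirrl/jazz-albums-recommender | scripts/fetch_era_spotify.py | classify_genres
-- ===== SOURCE A (Python) =====
-- GENRE_TO_ERA = {
--     # Early Jazz
--     'dixieland': 'early-jazz', 'new orleans jazz': 'early-jazz',
--     'early jazz': 'early-jazz', 'ragtime': 'early-jazz',
--     'trad jazz': 'early-jazz', 'traditional jazz': 'early-jazz',
--     'classic jazz': 'early-jazz', 'new orleans': 'early-jazz',
--     # Swing
--     'swing': 'swing', 'big band': 'swing', 'gypsy jazz': 'swing',
--     'jump blues': 'swing', 'vocal jazz': 'swing',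
--     # Bebop
--     'bebop': 'bebop', 'bop': 'bebop',
--     # Cool Jazz
--     'cool jazz': 'cool-jazz', 'west coast jazz': 'cool-jazz',
--     'bossa nova': 'cool-jazz', 'chamber jazz': 'cool-jazz',
--     'third stream': 'cool-jazz',
--     # Hard Bop
--     'hard bop': 'hard-bop', 'soul jazz': 'hard-bop',
--     'post-bop': 'hard-bop', 'modal jazz': 'hard-bop',
--     'jazz organ': 'hard-bop', 'jazz trumpet': 'hard-bop',
--     'jazz saxophone': 'hard-bop', 'jazz piano': 'hard-bop',
--     # Free Jazz
--     'free jazz': 'free-jazz', 'avant-garde jazz': 'free-jazz',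
--     'free improvisation': 'free-jazz', 'spiritual jazz': 'free-jazz',
--     'loft jazz': 'free-jazz', 'ecm-style jazz': 'free-jazz',
--     # Fusion
--     'jazz fusion': 'fusion', 'jazz-funk': 'fusion',
--     'jazz funk': 'fusion', 'jazz rock': 'fusion',
--     'electric jazz': 'fusion', 'crossover jazz': 'fusion',
--     'jazz bass': 'fusion', 'progressive jazz': 'fusion',
--     # Contemporary
--     'contemporary jazz': 'contemporary', 'nu jazz': 'contemporary',
--     'acid jazz': 'contemporary', 'smooth jazz': 'contemporary',
--     'jazz rap': 'contemporary', 'neo-bop': 'contemporary',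
--     'modern jazz': 'contemporary',
-- }
--
-- ERA_PRIORITY = {
--     'early-jazz': 0, 'swing': 1, 'bebop': 2, 'cool-jazz': 3,
--     'hard-bop': 4, 'free-jazz': 5, 'fusion': 6, 'contemporary': 7,
-- }
--
-- def classify_genres(genres):
--     """Map Spotify genres to a suggested era."""
--     mapped_eras = []
--     for genre in genres:
--         era = GENRE_TO_ERA.get(genre)
--         if era and era not in mapped_eras:
--             mapped_eras.append(era)
--
--     if not mapped_eras:
--         return None
--
--     if len(mapped_eras) == 1:
--         return mapped_eras[0]
--
--     mapped_eras.sort(key=lambda e: ERA_PRIORITY.get(e, 99))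
--     return mapped_eras[0]
-- ===== SOURCE B (Python) =====
-- """Map Spotify genres to a suggested era: flatten the two tables into one
-- genre->priority dict, take the minimum priority seen, and index back into
-- the priority-ordered era list."""
--
-- ERA_BY_PRIORITY = ['early-jazz', 'swing', 'bebop', 'cool-jazz', 'hard-bop', 'free-jazz', 'fusion', 'contemporary']
-- GENRE_TO_PRIORITY = {
--     'dixieland': 0,
--     'new orleans jazz': 0,
--     'early jazz': 0,
--     'ragtime': 0,
--     'trad jazz': 0,
--     'traditional jazz': 0,
--     'classic jazz': 0,
--     'new orleans': 0,
--     'swing': 1,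
--     'big band': 1,
--     'gypsy jazz': 1,
--     'jump blues': 1,
--     'vocal jazz': 1,
--     'bebop': 2,
--     'bop': 2,
--     'cool jazz': 3,
--     'west coast jazz': 3,
--     'bossa nova': 3,
--     'chamber jazz': 3,
--     'third stream': 3,
--     'hard bop': 4,
--     'soul jazz': 4,
--     'post-bop': 4,
--     'modal jazz': 4,
--     'jazz organ': 4,
--     'jazz trumpet': 4,
--     'jazz saxophone': 4,
--     'jazz piano': 4,
--     'free jazz': 5,
--     'avant-garde jazz': 5,
--     'free improvisation': 5,
--     'spiritual jazz': 5,
--     'loft jazz': 5,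
--     'ecm-style jazz': 5,
--     'jazz fusion': 6,
--     'jazz-funk': 6,
--     'jazz funk': 6,
--     'jazz rock': 6,
--     'electric jazz': 6,
--     'crossover jazz': 6,
--     'jazz bass': 6,
--     'progressive jazz': 6,
--     'contemporary jazz': 7,
--     'nu jazz': 7,
--     'acid jazz': 7,
--     'smooth jazz': 7,
--     'jazz rap': 7,
--     'neo-bop': 7,
--     'modern jazz': 7,
-- }
--
--
-- def classify_genres(genres):
--     """Map Spotify genres to a suggested era."""
--     best = min((GENRE_TO_PRIORITY[g] for g in genres if g in GENRE_TO_PRIORITY),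
--                default=None)
--     return None if best is None else ERA_BY_PRIORITY[best]
-- ===== Notes on version B (the rewrite author's own statement) =====
-- stated objective: alternative
-- what changed: Flattens the two tables into a single genre->priority dict plus a priority-ordered era list, takes min() of the mapped priorities and indexes back, instead of building a deduplicated era list, branching on its length and sorting it by priority.
import Mathlib
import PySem

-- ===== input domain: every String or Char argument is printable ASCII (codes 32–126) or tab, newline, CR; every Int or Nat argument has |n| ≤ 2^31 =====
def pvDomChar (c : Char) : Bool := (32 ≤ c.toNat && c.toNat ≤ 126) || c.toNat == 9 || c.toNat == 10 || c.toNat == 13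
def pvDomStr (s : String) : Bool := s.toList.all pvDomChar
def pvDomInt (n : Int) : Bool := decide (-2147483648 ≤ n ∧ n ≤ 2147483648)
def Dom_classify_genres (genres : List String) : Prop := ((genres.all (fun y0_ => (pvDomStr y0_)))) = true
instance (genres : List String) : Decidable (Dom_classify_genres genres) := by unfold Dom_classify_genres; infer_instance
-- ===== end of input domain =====

-- B flattens the two tables into one genre->priority dict plus a priority-ordered era
-- list, takes min() of mapped priorities and indexes back; A builds a dedup era list,
-- branches on its length and sorts it by priority. Objective: alternative.

-- ===== PORT A =====
def GENRE_TO_ERA : PySem.Dict String String := PySem.Dict.mk [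
  ("dixieland", "early-jazz"), ("new orleans jazz", "early-jazz"),
  ("early jazz", "early-jazz"), ("ragtime", "early-jazz"),
  ("trad jazz", "early-jazz"), ("traditional jazz", "early-jazz"),
  ("classic jazz", "early-jazz"), ("new orleans", "early-jazz"),
  ("swing", "swing"), ("big band", "swing"), ("gypsy jazz", "swing"),
  ("jump blues", "swing"), ("vocal jazz", "swing"),
  ("bebop", "bebop"), ("bop", "bebop"),
  ("cool jazz", "cool-jazz"), ("west coast jazz", "cool-jazz"),
  ("bossa nova", "cool-jazz"), ("chamber jazz", "cool-jazz"),
  ("third stream", "cool-jazz"),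
  ("hard bop", "hard-bop"), ("soul jazz", "hard-bop"),
  ("post-bop", "hard-bop"), ("modal jazz", "hard-bop"),
  ("jazz organ", "hard-bop"), ("jazz trumpet", "hard-bop"),
  ("jazz saxophone", "hard-bop"), ("jazz piano", "hard-bop"),
  ("free jazz", "free-jazz"), ("avant-garde jazz", "free-jazz"),
  ("free improvisation", "free-jazz"), ("spiritual jazz", "free-jazz"),
  ("loft jazz", "free-jazz"), ("ecm-style jazz", "free-jazz"),
  ("jazz fusion", "fusion"), ("jazz-funk", "fusion"),
  ("jazz funk", "fusion"), ("jazz rock", "fusion"),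
  ("electric jazz", "fusion"), ("crossover jazz", "fusion"),
  ("jazz bass", "fusion"), ("progressive jazz", "fusion"),
  ("contemporary jazz", "contemporary"), ("nu jazz", "contemporary"),
  ("acid jazz", "contemporary"), ("smooth jazz", "contemporary"),
  ("jazz rap", "contemporary"), ("neo-bop", "contemporary"),
  ("modern jazz", "contemporary")]

def ERA_PRIORITY : PySem.Dict String Int := PySem.Dict.ofList [
  ("early-jazz", 0), ("swing", 1), ("bebop", 2), ("cool-jazz", 3),
  ("hard-bop", 4), ("free-jazz", 5), ("fusion", 6), ("contemporary", 7)]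

-- ERA_PRIORITY.get(e, 99): the sort key of A
def eraPrio (e : String) : Int := PySem.Dict.getD ERA_PRIORITY e 99

-- one loop step of A: `era = GENRE_TO_ERA.get(genre); if era and era not in mapped_eras: append`
def stepA (acc : List String) (g : String) : List String :=
  match PySem.Dict.get? GENRE_TO_ERA g with
  | some era => if era ≠ "" ∧ era ∉ acc then acc ++ [era] else acc
  | none => acc

def classify_genres (genres : List String) : Option String :=
  let mapped := genres.foldl stepA []
  if mapped = [] then none
  else if mapped.length = 1 then PySem.List.pyGet? mapped 0
  else PySem.List.pyGet? (PySem.List.sorted mapped eraPrio false) 0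

-- ===== PORT B =====
-- B's tables: the eras in priority order, and each genre mapped straight to its priority
def ERA_BY_PRIORITY : List String :=
  ["early-jazz", "swing", "bebop", "cool-jazz", "hard-bop", "free-jazz", "fusion", "contemporary"]

def GENRE_TO_PRIORITY : PySem.Dict String Int := PySem.Dict.mk [
  ("dixieland", 0), ("new orleans jazz", 0), ("early jazz", 0), ("ragtime", 0),
  ("trad jazz", 0), ("traditional jazz", 0), ("classic jazz", 0), ("new orleans", 0),
  ("swing", 1), ("big band", 1), ("gypsy jazz", 1), ("jump blues", 1), ("vocal jazz", 1),
  ("bebop", 2), ("bop", 2),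
  ("cool jazz", 3), ("west coast jazz", 3), ("bossa nova", 3), ("chamber jazz", 3),
  ("third stream", 3),
  ("hard bop", 4), ("soul jazz", 4), ("post-bop", 4), ("modal jazz", 4),
  ("jazz organ", 4), ("jazz trumpet", 4), ("jazz saxophone", 4), ("jazz piano", 4),
  ("free jazz", 5), ("avant-garde jazz", 5), ("free improvisation", 5),
  ("spiritual jazz", 5), ("loft jazz", 5), ("ecm-style jazz", 5),
  ("jazz fusion", 6), ("jazz-funk", 6), ("jazz funk", 6), ("jazz rock", 6),
  ("electric jazz", 6), ("crossover jazz", 6), ("jazz bass", 6), ("progressive jazz", 6),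
  ("contemporary jazz", 7), ("nu jazz", 7), ("acid jazz", 7), ("smooth jazz", 7),
  ("jazz rap", 7), ("neo-bop", 7), ("modern jazz", 7)]

-- min(GENRE_TO_PRIORITY[g] for g in genres if g in GENRE_TO_PRIORITY, default=None)
def classify_genres_alt (genres : List String) : Option String :=
  let best := genres.foldl (fun acc g =>
    match PySem.Dict.get? GENRE_TO_PRIORITY g with
    | some p => some (match acc with | none => p | some b => min b p)
    | none => acc) (none : Option Int)
  match best with
  | none => none
  | some p => PySem.List.pyGet? ERA_BY_PRIORITY p

-- ===== PRECONDITION & SPEC =====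
def Spec_classify_genres (genres : List String) (out : Option String) : Prop := out = classify_genres_alt genres
instance (genres : List String) (out : Option String) : Decidable (Spec_classify_genres genres out) := by unfold Spec_classify_genres; infer_instance

-- ===== CLAIM (what is proved, stated in full; the proofs are below) =====
def Claim_equal_classify_genres : Prop := ∀ (genres : List String), Dom_classify_genres genres → Spec_classify_genres genres (classify_genres genres)

-- ===== LEMMAS AND PROOFS =====

-- the eight era names (values of GENRE_TO_ERA / keys of ERA_PRIORITY)
def ERAS : List String :=
  ["early-jazz", "swing", "bebop", "cool-jazz", "hard-bop", "free-jazz", "fusion", "contemporary"]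

-- lookup in a dict whose values were mapped pointwise
theorem get?_mk_map_values {ν ν' : Type} (f : ν → ν') (l : List (String × ν)) (x : String) :
    (PySem.Dict.mk (l.map (fun p => (p.1, f p.2)))).get? x
      = Option.map f ((PySem.Dict.mk l).get? x) := by
  induction l with
  | nil => rfl
  | cons p t ih =>
    rw [List.map_cons, PySem.Dict.get?_mk_cons, PySem.Dict.get?_mk_cons]
    by_cases h : p.1 == x
    · simp [h]
    · simp only [h, Bool.false_eq_true, if_false, ih]

set_option maxRecDepth 8000 in
theorem prio_get (g : String) :
    GENRE_TO_PRIORITY.get? g = Option.map eraPrio (GENRE_TO_ERA.get? g) := by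
  have h1 : GENRE_TO_ERA = PySem.Dict.mk GENRE_TO_ERA.items := rfl
  have h2 : GENRE_TO_PRIORITY
      = PySem.Dict.mk (GENRE_TO_ERA.items.map (fun p => (p.1, eraPrio p.2))) := by decide
  rw [h2, get?_mk_map_values eraPrio GENRE_TO_ERA.items g, ← h1]

set_option maxRecDepth 4000 in
theorem era_of_get? (g era : String) (h : GENRE_TO_ERA.get? g = some era) :
    era ∈ ERAS ∧ era ≠ "" := by
  have hm := PySem.Dict.mem_items_of_get?_eq_some GENRE_TO_ERA h
  have hall : ∀ p ∈ GENRE_TO_ERA.items, p.2 ∈ ERAS ∧ p.2 ≠ "" := by decide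
  exact hall _ hm

set_option maxRecDepth 4000 in
theorem eraPrio_inj : ∀ e1 ∈ ERAS, ∀ e2 ∈ ERAS, eraPrio e1 = eraPrio e2 → e1 = e2 := by decide

theorem era_index : ∀ e ∈ ERAS, PySem.List.pyGet? ERA_BY_PRIORITY (eraPrio e) = some e := by decide

-- B's loop step, named for the proofs
def stepB (acc : Option Int) (g : String) : Option Int :=
  match PySem.Dict.get? GENRE_TO_PRIORITY g with
  | some p => some (match acc with | none => p | some b => min b p)
  | none => acc

-- invariant tying A's dedup accumulator to B's running minimum priority
def InvAB (acc : List String) (best : Option Int) : Prop :=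
  (∀ e ∈ acc, e ∈ ERAS) ∧
  match best with
  | none => acc = []
  | some p => ∃ b, b ∈ acc ∧ p = eraPrio b ∧ ∀ x ∈ acc, p ≤ eraPrio x

theorem inv_step (acc : List String) (best : Option Int) (g : String)
    (h : InvAB acc best) : InvAB (stepA acc g) (stepB best g) := by
  obtain ⟨hsub, hbest⟩ := h
  unfold stepA stepB
  rw [prio_get g]
  cases hg : GENRE_TO_ERA.get? g with
  | none => exact ⟨hsub, hbest⟩
  | some era =>
    obtain ⟨hmem, hne⟩ := era_of_get? g era hg
    simp only [Option.map_some]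
    by_cases hin : era ∈ acc
    · have hcond : ¬ (era ≠ "" ∧ era ∉ acc) := fun hc => hc.2 hin
      rw [if_neg hcond]
      match best, hbest with
      | none, hbest => exact absurd (hbest ▸ hin) List.not_mem_nil
      | some p, ⟨b, hb, hp, hmin⟩ =>
        have hle : p ≤ eraPrio era := hmin era hin
        refine ⟨hsub, b, hb, ?_, ?_⟩
        · show min p (eraPrio era) = eraPrio b
          rw [min_eq_left hle]; exact hp
        · intro x hx
          show min p (eraPrio era) ≤ eraPrio x
          exact le_trans (min_le_left _ _) (hmin x hx)
    · rw [if_pos ⟨hne, hin⟩]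
      have hsub' : ∀ e ∈ acc ++ [era], e ∈ ERAS := by
        intro e he
        rcases List.mem_append.mp he with h1 | h1
        · exact hsub e h1
        · simp at h1; exact h1 ▸ hmem
      match best, hbest with
      | none, hbest =>
        subst hbest
        refine ⟨hsub', era, by simp, rfl, ?_⟩
        intro x hx; simp at hx; subst hx; exact le_refl _
      | some p, ⟨b, hb, hp, hmin⟩ =>
        refine ⟨hsub', ?_⟩
        have hbound : ∀ x ∈ acc ++ [era], min p (eraPrio era) ≤ eraPrio x := by
          intro x hx
          rcases List.mem_append.mp hx with h1 | h1
          · exact le_trans (min_le_left _ _) (hmin x h1)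
          · simp at h1; subst h1; exact min_le_right _ _
        by_cases hl : eraPrio era ≤ p
        · refine ⟨era, List.mem_append_right _ (by simp), ?_, hbound⟩
          show min p (eraPrio era) = eraPrio era
          exact min_eq_right hl
        · refine ⟨b, List.mem_append_left _ hb, ?_, hbound⟩
          show min p (eraPrio era) = eraPrio b
          rw [min_eq_left (le_of_lt (not_le.mp hl))]; exact hp

theorem inv_foldl (genres : List String) (acc : List String) (best : Option Int)
    (h : InvAB acc best) : InvAB (genres.foldl stepA acc) (genres.foldl stepB best) := by
  induction genres generalizing acc best with
  | nil => exact h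
  | cons g gs ih =>
    rw [List.foldl_cons, List.foldl_cons]
    exact ih _ _ (inv_step acc best g h)

-- ===== VERDICT (by name: the statement is the Claim_ definition above) =====
set_option maxRecDepth 10000 in
theorem classify_genres_spec : Claim_equal_classify_genres := by
  intro genres _
  unfold Spec_classify_genres classify_genres classify_genres_alt
  have h := inv_foldl genres [] none ⟨by simp, rfl⟩
  show _ = (match genres.foldl stepB none with
    | none => none
    | some p => PySem.List.pyGet? ERA_BY_PRIORITY p)
  generalize hacc : List.foldl stepA [] genres = acc at h ⊢
  generalize hstq : List.foldl stepB none genres = best at h ⊢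
  obtain ⟨hsub, hbest⟩ := h
  match best, hbest with
  | none, hbest => subst hbest; simp
  | some p, ⟨b, hb, hp, hmin⟩ =>
    have hne : acc ≠ [] := List.ne_nil_of_mem hb
    have hbE : b ∈ ERAS := hsub b hb
    simp only [hne, if_false]
    subst hp
    by_cases h1 : acc.length = 1
    · simp only [h1, if_true]
      obtain ⟨x, hx⟩ := List.length_eq_one_iff.mp h1
      subst hx
      simp at hb
      subst hb
      rw [era_index b hbE]
      simp [PySem.List.pyGet?, PySem.List.pyIdx?]
    · simp only [h1, if_false]
      cases hs : PySem.List.sorted acc eraPrio false with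
      | nil => exact absurd ((PySem.List.sorted_eq_nil_iff acc eraPrio false).mp hs) hne
      | cons m t =>
        have hmacc : m ∈ acc := by
          have : m ∈ PySem.List.sorted acc eraPrio false := by simp [hs]
          exact (PySem.List.mem_sorted acc eraPrio false m).mp this
        have hle1 : eraPrio m ≤ eraPrio b := PySem.List.key_head_sorted_le acc eraPrio hs b hb
        have hle2 : eraPrio b ≤ eraPrio m := hmin m hmacc
        have hbm : m = b := eraPrio_inj m (hsub m hmacc) b hbE (le_antisymm hle1 hle2)
        rw [era_index b hbE]
        simp [PySem.List.pyGet?, PySem.List.pyIdx?, hbm]
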